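-- pv_equiv track=rewrite | github.com/KonstantinosAng/CodeWars | Python/[6 kyu] Peel the onion.py | peel_the_onion
-- ===== SOURCE A (Python) =====
-- def recur(index, array, store):
--   pointer = index
--   while pointer < len(array):
--     tempS = store[0] - array[pointer]
--     if tempS % 2 == 0:
--       store.pop(0)
--       store = [array[pointer]] + store
--       store.append(tempS)
--       store = recur(pointer+1, array, store)
--       return store
--     else:
--       pointer += 1
--   return store
--
-- def peel_the_onion(s, d):
--   ret = []
--   for i in range(1, s+1):
--     ret.append(i**d)
--   if len(ret) == 1: return ret
--   if len(ret) == 2: return ret[-1:]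
--   ret = [x for x in reversed(ret)]
--   store = []
--   store.append(ret[0])
--   store = recur(1, ret, store)
--   return [x for x in sorted(store, reverse=True)]
-- ===== SOURCE B (Python) =====
-- def peel_the_onion(s, d):
--     ret = [i ** d for i in range(1, s + 1)]
--     if len(ret) == 1:
--         return ret
--     if len(ret) == 2:
--         return [ret[1]]
--     rev = ret[::-1]
--     head = rev[0]
--     diffs = []
--     for x in rev[1:]:
--         t = head - x
--         if t % 2 == 0:
--             diffs.append(t)
--             head = x
--     return sorted([head] + diffs, reverse=True)
-- ===== Notes on version B (the rewrite author's own statement) =====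
-- stated objective: alternative
-- what changed: Replaces the deep tail recursion with front-pops/prepends/appends on a shared store list by a single forward pass that keeps only the current head and an append-only list of parity differences, then sorts once.
-- outside the precondition, e.g. on peel_the_onion(3, -1): A returns [0.3333333333333333], B returns [0.3333333333333333]
import Mathlib
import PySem

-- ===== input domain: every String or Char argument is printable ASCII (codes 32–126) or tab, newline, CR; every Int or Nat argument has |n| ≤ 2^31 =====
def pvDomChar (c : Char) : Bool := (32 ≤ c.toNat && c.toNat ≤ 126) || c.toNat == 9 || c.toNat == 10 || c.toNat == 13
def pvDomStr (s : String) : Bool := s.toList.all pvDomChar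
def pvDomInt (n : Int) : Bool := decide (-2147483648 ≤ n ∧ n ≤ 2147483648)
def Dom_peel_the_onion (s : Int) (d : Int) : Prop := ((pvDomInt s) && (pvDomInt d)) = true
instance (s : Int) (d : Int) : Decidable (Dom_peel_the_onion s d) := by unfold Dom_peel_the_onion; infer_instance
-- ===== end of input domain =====

-- B replaces A's deep tail recursion mutating a shared store (pop-front / prepend / append)
-- by one forward pass keeping only the current head and an append-only list of differences,
-- then one final sort (objective: alternative decomposition of the same computation).


-- ===== PORT A =====
-- recur(index, array, store): the while loop over `pointer` and the tail call both advance
-- `pointer`, so the whole body is one recursion on pointer.  `store[0]`/`store.pop(0)` are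
-- ported with headD/tail as totality guards only: every actual call has store ≠ [] (Python
-- would raise IndexError on an empty store, which never happens on the calls A makes).
def recurA (pointer : Nat) (array : List Int) (store : List Int) : List Int :=
  if h : pointer < array.length then
    let tempS := store.headD 0 - array[pointer]
    if PySem.Int.mod tempS 2 = 0 then
      -- store.pop(0); store = [array[pointer]] + store; store.append(tempS); return recur(pointer+1, …)
      recurA (pointer + 1) array (array[pointer] :: (store.tail ++ [tempS]))
    else
      recurA (pointer + 1) array store
  else store
termination_by array.length - pointer

-- i**d is exact for 0 ≤ d (Pre_); for d < 0 Python yields floats, excluded by Pre_.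
def peel_the_onion (s : Int) (d : Int) : List Int :=
  let ret := (PySem.List.pyRange 1 (s + 1) 1).foldl (fun acc i => acc ++ [i ^ d.toNat]) []
  if ret.length = 1 then ret
  else if ret.length = 2 then PySem.List.slice ret (some (-1)) none   -- ret[-1:]
  else
    let ret2 := ret.reverse                                           -- [x for x in reversed(ret)]
    let store := [ret2.headD 0]                                       -- store.append(ret[0]); ret ≠ [] under Pre_
    let store2 := recurA 1 ret2 store
    PySem.List.sorted store2 (fun x => x) true                        -- sorted(store, reverse=True)

-- ===== PORT B =====
-- loop body of Source B: carry (head, diffs)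
def stepB (p : Int × List Int) (x : Int) : Int × List Int :=
  let t := p.1 - x
  if PySem.Int.mod t 2 = 0 then (x, p.2 ++ [t]) else p

def peel_the_onion_alt (s : Int) (d : Int) : List Int :=
  let ret := (PySem.List.pyRange 1 (s + 1) 1).map (fun i => i ^ d.toNat)
  if ret.length = 1 then ret
  else if ret.length = 2 then [(PySem.List.pyGet? ret 1).getD 0]      -- [ret[1]]; in range for length 2
  else
    let rev := ret.reverse
    let p := rev.tail.foldl stepB (rev.headD 0, [])                   -- rev[0] in range under Pre_
    PySem.List.sorted (p.1 :: p.2) (fun x => x) true                  -- sorted([head] + diffs, reverse=True)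

-- ===== PRECONDITION & SPEC =====
-- Pre_ excludes s ≤ 0, where A raises IndexError (store.append(ret[0]) on an empty ret),
-- and d < 0, where i**d yields floats so A's result is not a list of ints.
def Pre_peel_the_onion (s : Int) (d : Int) : Prop := 1 ≤ s ∧ 0 ≤ d
instance (s : Int) (d : Int) : Decidable (Pre_peel_the_onion s d) := by unfold Pre_peel_the_onion; infer_instance
def pvWitness_peel_the_onion : Int × Int := (5, 2)

def Spec_peel_the_onion (s : Int) (d : Int) (out : List Int) : Prop := out = peel_the_onion_alt s d
instance (s : Int) (d : Int) (out : List Int) : Decidable (Spec_peel_the_onion s d out) := by unfold Spec_peel_the_onion; infer_instance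

-- ===== CLAIM (what is proved, stated in full; the proofs are below) =====
def Claim_equal_peel_the_onion : Prop := ∀ (s : Int) (d : Int), Dom_peel_the_onion s d → Pre_peel_the_onion s d → Spec_peel_the_onion s d (peel_the_onion s d)

-- ===== LEMMAS AND PROOFS =====

-- building ret by repeated append is map
lemma foldl_append_singleton (f : Int → Int) :
    ∀ (l : List Int) (acc : List Int),
      l.foldl (fun a i => a ++ [f i]) acc = acc ++ l.map f := by
  intro l
  induction l with
  | nil => simp
  | cons x xs ih => intro acc; simp [List.foldl, ih]

-- the diffs accumulator of stepB is append-only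
lemma foldl_stepB_acc :
    ∀ (xs : List Int) (h : Int) (ds : List Int),
      xs.foldl stepB (h, ds)
        = ((xs.foldl stepB (h, [])).1, ds ++ (xs.foldl stepB (h, [])).2) := by
  intro xs
  induction xs with
  | nil => intro h ds; simp
  | cons x xs ih =>
    intro h ds
    simp only [List.foldl, stepB]
    split_ifs with hp
    · rw [ih x (ds ++ [h - x])]
      simp only [List.nil_append]
      rw [ih x [h - x]]
      simp
    · exact ih h ds

-- A's recursion, on a suffix of the array with a nonempty store, is B's fold
lemma recurA_eq_fold :
    ∀ (xs : List Int) (array : List Int) (p : Nat), array.drop p = xs →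
      ∀ (h : Int) (t : List Int),
        recurA p array (h :: t)
          = (xs.foldl stepB (h, [])).1 :: (t ++ (xs.foldl stepB (h, [])).2) := by
  intro xs
  induction xs with
  | nil =>
    intro array p hdrop h t
    have hlen : array.length ≤ p := by
      have := List.drop_eq_nil_iff.mp hdrop
      omega
    rw [recurA]
    simp [Nat.not_lt.mpr hlen]
  | cons x xs ih =>
    intro array p hdrop h t
    have hp : p < array.length := by
      by_contra hge
      rw [List.drop_eq_nil_of_le (by omega)] at hdrop
      exact absurd hdrop.symm (List.cons_ne_nil x xs)
    have hx : array[p] = x := by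
      have h0 : (array.drop p)[0]'(by rw [hdrop]; simp) = array[p + 0] :=
        List.getElem_drop ..
      simpa [hdrop] using h0.symm
    have hdrop' : array.drop (p + 1) = xs := by
      have h1 := congrArg (List.drop 1) hdrop
      simpa [List.drop_drop, Nat.add_comm] using h1
    rw [recurA]
    simp only [hp, dif_pos, hx]
    have hhead : (h :: t).headD 0 = h := rfl
    have htail : (h :: t).tail = t := rfl
    rw [hhead, htail]
    simp only [List.foldl, stepB]
    split_ifs with hm
    · rw [ih array (p + 1) hdrop' x (t ++ [h - x])]
      rw [List.nil_append, foldl_stepB_acc xs x [h - x]]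
      simp
    · exact ih array (p + 1) hdrop' h t

lemma length_two_exists (l : List Int) (h : l.length = 2) : ∃ a b, l = [a, b] := by
  match l, h with
  | [a, b], _ => exact ⟨a, b, rfl⟩

-- ===== VERDICT (by name: the statement is the Claim_ definition above) =====
theorem peel_the_onion_spec : Claim_equal_peel_the_onion := by
  intro s d _ hpre
  obtain ⟨hs, hd⟩ := hpre
  unfold Spec_peel_the_onion peel_the_onion peel_the_onion_alt
  rw [foldl_append_singleton]
  simp only [List.nil_append]
  set R := (PySem.List.pyRange 1 (s + 1) 1).map (fun i => i ^ d.toNat) with hR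
  have hRlen : R.length = s.toNat := by
    simp [hR, PySem.List.length_pyRange_one]
  have hRne : R ≠ [] := by
    have hlen : R.length ≠ 0 := by omega
    exact fun hnil => hlen (by simp [hnil])
  by_cases h1 : R.length = 1
  · simp [h1]
  · by_cases h2 : R.length = 2
    · simp only [h2, if_true]
      obtain ⟨a, b, hab⟩ := length_two_exists R h2
      rw [hab]
      rw [PySem.List.slice_from_neg_one]
      simp [PySem.List.pyGet?, PySem.List.pyIdx?]
    · obtain ⟨hh, tt, hrev⟩ : ∃ hh tt, R.reverse = hh :: tt := by
        cases hrev : R.reverse with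
        | nil => exact absurd (by simpa using congrArg List.reverse hrev) hRne
        | cons a l => exact ⟨a, l, rfl⟩
      simp only [h1, h2, if_false, hrev, List.headD_cons, List.tail_cons]
      rw [recurA_eq_fold tt (hh :: tt) 1 rfl hh []]
      simp
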